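-- pv_equiv track=rewrite | github.com/Sybertnetics-Artificial-Intelligence/RunaLang | runa/src/runa/languages/tier4/scilla/scilla_generator.py | format_scilla_code
-- ===== SOURCE A (Python) =====
-- def format_scilla_code(code: str) -> str:
--     """Format Scilla code for readability"""
--     lines = code.split('\n')
--     formatted_lines = []
--
--     for line in lines:
--         # Remove trailing whitespace
--         line = line.rstrip()
--
--         # Add line if not empty or if it's a meaningful empty line
--         if line or (formatted_lines and formatted_lines[-1]):
--             formatted_lines.append(line)
--
--     # Remove trailing empty lines
--     while formatted_lines and not formatted_lines[-1]:
--         formatted_lines.pop()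
--
--     return '\n'.join(formatted_lines) + '\n'
-- ===== SOURCE B (Python) =====
-- def format_scilla_code(code: str) -> str:
--     """Format Scilla code for readability"""
--     paragraphs, current = [], []
--     for line in code.split('\n'):
--         line = line.rstrip()
--         if line:
--             current.append(line)
--         elif current:
--             paragraphs.append(current)
--             current = []
--     if current:
--         paragraphs.append(current)
--     return '\n\n'.join('\n'.join(p) for p in paragraphs) + '\n'
-- ===== Notes on version B (the rewrite author's own statement) =====
-- stated objective: alternative
-- what changed: B groups the nonblank lines into paragraphs and joins the paragraphs with a blank-line separator, which eliminates A's last-kept-line state check and the trailing-pop while loop.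
import Mathlib
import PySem

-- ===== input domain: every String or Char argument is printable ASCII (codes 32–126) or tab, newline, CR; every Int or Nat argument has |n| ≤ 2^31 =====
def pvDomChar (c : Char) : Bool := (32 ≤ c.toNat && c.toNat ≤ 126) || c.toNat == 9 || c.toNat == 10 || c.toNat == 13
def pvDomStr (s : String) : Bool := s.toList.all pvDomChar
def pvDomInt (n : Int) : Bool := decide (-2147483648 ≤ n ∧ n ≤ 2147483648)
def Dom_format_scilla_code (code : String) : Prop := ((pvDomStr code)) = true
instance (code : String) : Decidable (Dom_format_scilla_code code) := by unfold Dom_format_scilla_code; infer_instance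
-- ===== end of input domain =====

-- B groups nonblank lines into paragraphs joined with a blank-line separator instead of A's stateful
-- blank-collapse list plus trailing-pop loop (objective: alternative decomposition).

-- ===== PORT A =====
-- structural recursion mirroring `while formatted_lines and not formatted_lines[-1]: formatted_lines.pop()`
def pvPopTrailing : List String → List String
  | [] => []
  | x :: xs =>
    match pvPopTrailing xs with
    | [] => if x = "" then [] else [x]
    | ys => x :: ys

def format_scilla_code (code : String) : String :=
  let lines := (PySem.Str.split? code "\n").getD []
  let formatted := lines.foldl (fun acc line =>
    let l := PySem.Str.rstrip line
    if l ≠ "" ∨ (acc ≠ [] ∧ acc.getLastD "" ≠ "") then acc ++ [l] else acc) []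
  PySem.Str.join "\n" (pvPopTrailing formatted) ++ "\n"

-- ===== PORT B =====
def format_scilla_code_alt (code : String) : String :=
  let st := ((PySem.Str.split? code "\n").getD []).foldl
    (fun (st : List (List String) × List String) line =>
      let l := PySem.Str.rstrip line
      if l ≠ "" then (st.1, st.2 ++ [l])
      else if st.2 ≠ [] then (st.1 ++ [st.2], ([] : List String))
      else st) ([], [])
  let ps := if st.2 ≠ [] then st.1 ++ [st.2] else st.1
  PySem.Str.join "\n\n" (ps.map (PySem.Str.join "\n")) ++ "\n"

-- ===== PRECONDITION & SPEC =====
def Spec_format_scilla_code (code : String) (out : String) : Prop := out = format_scilla_code_alt code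
instance (code : String) (out : String) : Decidable (Spec_format_scilla_code code out) := by unfold Spec_format_scilla_code; infer_instance

-- ===== CLAIM (what is proved, stated in full; the proofs are below) =====
def Claim_equal_format_scilla_code : Prop := ∀ (code : String), Dom_format_scilla_code code → Spec_format_scilla_code code (format_scilla_code code)

-- ===== LEMMAS AND PROOFS =====

-- A's loop body and B's loop body, on an already-rstripped line
def pvStepA (acc : List String) (l : String) : List String :=
  if l ≠ "" ∨ (acc ≠ [] ∧ acc.getLastD "" ≠ "") then acc ++ [l] else acc

def pvStepB (st : List (List String) × List String) (l : String) :
    List (List String) × List String :=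
  if l ≠ "" then (st.1, st.2 ++ [l])
  else if st.2 ≠ [] then (st.1 ++ [st.2], ([] : List String))
  else st

-- paragraphs rendered as a flat line list with one blank line between paragraphs
def pvSepJoin : List (List String) → List String
  | [] => []
  | [p] => p
  | p :: q :: rest => p ++ [""] ++ pvSepJoin (q :: rest)

-- A's accumulator as a function of B's state
def pvShape (ps : List (List String)) (cur : List String) : List String :=
  if ps = [] then cur else pvSepJoin ps ++ [""] ++ cur

lemma pvSepJoin_concat (ps : List (List String)) (p : List String) :
    pvSepJoin (ps ++ [p]) = if ps = [] then p else pvSepJoin ps ++ [""] ++ p := by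
  induction ps with
  | nil => simp [pvSepJoin]
  | cons q ps ih =>
    cases ps with
    | nil => simp [pvSepJoin]
    | cons r rs =>
      simp only [List.cons_append, pvSepJoin] at *
      rw [ih]
      simp [List.append_assoc]


lemma pvSepJoin_ne_nil (ps : List (List String)) (hps : ps ≠ [])
    (h : ∀ p ∈ ps, p ≠ []) : pvSepJoin ps ≠ [] := by
  cases ps with
  | nil => exact absurd rfl hps
  | cons q ps =>
    cases ps with
    | nil => simpa [pvSepJoin] using h q (by simp)
    | cons r rs =>
      have hq : q ≠ [] := h q (by simp)
      simp [pvSepJoin]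


lemma pvSepJoin_last (ps : List (List String)) (hps : ps ≠ [])
    (h : ∀ p ∈ ps, p ≠ [] ∧ "" ∉ p) :
    ∃ ys x, pvSepJoin ps = ys ++ [x] ∧ x ≠ "" := by
  induction ps with
  | nil => exact absurd rfl hps
  | cons q ps ih =>
    cases ps with
    | nil =>
      obtain ⟨hq, hq'⟩ := h q (by simp)
      rcases List.eq_nil_or_concat q with h0 | ⟨ys, x, hyx⟩
      · exact absurd h0 hq
      · refine ⟨ys, x, by simpa [pvSepJoin] using hyx, ?_⟩
        intro hx; apply hq'; rw [hyx, hx]; simp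
    | cons r rs =>
      obtain ⟨ys, x, hyx, hx⟩ := ih (by simp) (fun p hp => h p (by simp [hp]))
      exact ⟨q ++ [""] ++ ys, x, by simp [pvSepJoin, hyx], hx⟩


lemma pvPop_concat_ne (ys : List String) (x : String) (hx : x ≠ "") :
    pvPopTrailing (ys ++ [x]) = ys ++ [x] := by
  induction ys with
  | nil => simp [pvPopTrailing, hx]
  | cons y ys ih =>
    simp only [List.cons_append, pvPopTrailing, ih]
    cases ys <;> simp


lemma pvPop_concat_blank (ys : List String) :
    pvPopTrailing (ys ++ [""]) = pvPopTrailing ys := by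
  induction ys with
  | nil => simp [pvPopTrailing]
  | cons y ys ih =>
    simp only [List.cons_append, pvPopTrailing, ih]


-- the main loop invariant: A's fold is the rendering of B's fold
lemma pv_loop (L : List String) : ∀ ps cur,
    (∀ p ∈ ps, p ≠ [] ∧ "" ∉ p) → "" ∉ cur →
    (∀ p ∈ (L.foldl pvStepB (ps, cur)).1, p ≠ [] ∧ "" ∉ p) ∧
    "" ∉ (L.foldl pvStepB (ps, cur)).2 ∧
    L.foldl pvStepA (pvShape ps cur) =
      pvShape (L.foldl pvStepB (ps, cur)).1 (L.foldl pvStepB (ps, cur)).2 := by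
  induction L with
  | nil => intro ps cur hps hcur; exact ⟨hps, hcur, rfl⟩
  | cons l L ih =>
    intro ps cur hps hcur
    simp only [List.foldl_cons]
    by_cases hl : l = ""
    · subst hl
      by_cases hc : cur = []
      · subst hc
        have hB : pvStepB (ps, []) "" = (ps, []) := by simp [pvStepB]
        have hA : pvStepA (pvShape ps []) "" = pvShape ps [] := by
          unfold pvStepA pvShape
          by_cases hp : ps = [] <;> simp [hp]
        rw [hB, hA]
        exact ih ps [] hps hcur
      · have hB : pvStepB (ps, cur) "" = (ps ++ [cur], []) := by simp [pvStepB, hc]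
        obtain ⟨cs, x, hcx⟩ : ∃ cs x, cur = cs ++ [x] := by
          rcases List.eq_nil_or_concat cur with h0 | ⟨cs, x, h0⟩
          · exact absurd h0 hc
          · exact ⟨cs, x, by simpa [List.concat_eq_append] using h0⟩
        have hx : x ≠ "" := by intro h; apply hcur; rw [hcx, h]; simp
        have hA : pvStepA (pvShape ps cur) "" = pvShape (ps ++ [cur]) [] := by
          unfold pvStepA
          have hlast : (pvShape ps cur).getLastD "" = x := by
            unfold pvShape
            by_cases hp : ps = [] <;> simp [hp, hcx, ← List.append_assoc]
          have hne : pvShape ps cur ≠ [] := by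
            unfold pvShape
            by_cases hp : ps = [] <;> simp [hp, hcx]
          rw [if_pos (Or.inr ⟨hne, by rw [hlast]; exact hx⟩)]
          unfold pvShape
          rw [pvSepJoin_concat]
          by_cases hp : ps = [] <;> simp [hp]
        rw [hB, hA]
        refine ih (ps ++ [cur]) [] ?_ (by simp)
        intro p hp
        rcases List.mem_append.1 hp with h | h
        · exact hps p h
        · simp at h; subst h; exact ⟨hc, hcur⟩
    · have hB : pvStepB (ps, cur) l = (ps, cur ++ [l]) := by simp [pvStepB, hl]
      have hA : pvStepA (pvShape ps cur) l = pvShape ps (cur ++ [l]) := by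
        unfold pvStepA pvShape
        by_cases hp : ps = [] <;> simp [hp, hl, List.append_assoc]
      rw [hB, hA]
      refine ih ps (cur ++ [l]) hps ?_
      simp [hcur, hl]

lemma pvPop_shape (ps : List (List String)) (cur : List String)
    (hps : ∀ p ∈ ps, p ≠ [] ∧ "" ∉ p) (hcur : "" ∉ cur) :
    pvPopTrailing (pvShape ps cur) = pvSepJoin (if cur ≠ [] then ps ++ [cur] else ps) := by
  by_cases hc : cur = []
  · subst hc
    rw [show (if ([] : List String) ≠ [] then ps ++ [[]] else ps) = ps from by simp]
    by_cases hp : ps = []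
    · subst hp; simp [pvShape, pvSepJoin, pvPopTrailing]
    · obtain ⟨ys, x, hyx, hx⟩ := pvSepJoin_last ps hp hps
      unfold pvShape
      rw [if_neg hp]
      simp only [List.append_nil]
      rw [pvPop_concat_blank, hyx, pvPop_concat_ne ys x hx, ← hyx]
  · obtain ⟨cs, x, hcx⟩ : ∃ cs x, cur = cs ++ [x] := by
      rcases List.eq_nil_or_concat cur with h0 | ⟨cs, x, h0⟩
      · exact absurd h0 hc
      · exact ⟨cs, x, by simpa [List.concat_eq_append] using h0⟩
    have hx : x ≠ "" := by intro h; apply hcur; rw [hcx, h]; simp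
    rw [if_pos hc, pvSepJoin_concat]
    have hshape : pvShape ps cur = if ps = [] then cur else pvSepJoin ps ++ [""] ++ cur := rfl
    rw [hshape]
    by_cases hp : ps = []
    · subst hp
      simp only [hcx]
      exact pvPop_concat_ne cs x hx
    · rw [if_neg hp, hcx, ← List.append_assoc]
      exact pvPop_concat_ne _ x hx

lemma pvChars_join_append (sep : List Char) (as bs : List (List Char))
    (ha : as ≠ []) (hb : bs ≠ []) :
    PySem.Chars.join sep (as ++ bs) =
      PySem.Chars.join sep as ++ sep ++ PySem.Chars.join sep bs := by
  induction as with
  | nil => exact absurd rfl ha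
  | cons a as ih =>
    cases as with
    | nil =>
      cases bs with
      | nil => exact absurd rfl hb
      | cons b bs' =>
        simp only [List.nil_append, List.cons_append, PySem.Chars.join_cons_cons,
          PySem.Chars.join_singleton]
    | cons a' as' =>
      simp only [List.cons_append, PySem.Chars.join_cons_cons]
      rw [show a' :: (as' ++ bs) = (a' :: as') ++ bs from rfl, ih (by simp)]
      simp [List.append_assoc]

lemma pvJoin_eq (ps : List (List String)) (h : ∀ p ∈ ps, p ≠ []) :
    PySem.Str.join "\n" (pvSepJoin ps) =
      PySem.Str.join "\n\n" (ps.map (PySem.Str.join "\n")) := by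
  induction ps with
  | nil => rfl
  | cons p ps ih =>
    cases ps with
    | nil =>
      rw [← String.toList_inj]
      simp only [pvSepJoin, List.map_cons, List.map_nil, PySem.Str.toList_join,
        PySem.Chars.join_singleton]
    | cons q rest =>
      have hmem : ∀ x ∈ q :: rest, x ≠ [] := fun x hx => h x (by simp [hx])
      have hS : pvSepJoin (q :: rest) ≠ [] := pvSepJoin_ne_nil _ (by simp) hmem
      have hp' : p ≠ [] := h p (by simp)
      have ihx : PySem.Str.join "\n" (pvSepJoin (q :: rest)) =
          PySem.Str.join "\n\n" ((q :: rest).map (PySem.Str.join "\n")) := ih hmem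
      rw [← String.toList_inj]
      have hP : (p.map String.toList) ≠ [] := by simpa using hp'
      have hMs : (pvSepJoin (q :: rest)).map String.toList ≠ [] := by simpa using hS
      obtain ⟨m, ms, hm⟩ := List.exists_cons_of_ne_nil hMs
      have step1 : (PySem.Str.join "\n" (pvSepJoin (p :: q :: rest))).toList =
          PySem.Chars.join ['\n'] (p.map String.toList) ++ ['\n'] ++
            ([] ++ ['\n'] ++ PySem.Chars.join ['\n'] ((pvSepJoin (q :: rest)).map String.toList)) := by
        rw [PySem.Str.toList_join]
        show PySem.Chars.join ['\n'] ((p ++ [""] ++ pvSepJoin (q :: rest)).map String.toList) = _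
        rw [List.map_append, List.map_append, List.append_assoc,
          pvChars_join_append ['\n'] _ _ hP (by simp)]
        congr 1
        show PySem.Chars.join ['\n'] ([] :: (pvSepJoin (q :: rest)).map String.toList) = _
        rw [hm, PySem.Chars.join_cons_cons, ← hm]
      have step2 : (PySem.Str.join "\n\n" ((p :: q :: rest).map (PySem.Str.join "\n"))).toList =
          (PySem.Str.join "\n" p).toList ++ ['\n', '\n'] ++
            PySem.Chars.join ['\n'] ((pvSepJoin (q :: rest)).map String.toList) := by
        rw [PySem.Str.toList_join]
        show PySem.Chars.join ['\n', '\n'] ((PySem.Str.join "\n" p).toList ::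
          ((q :: rest).map (PySem.Str.join "\n")).map String.toList) = _
        rw [show ((q :: rest).map (PySem.Str.join "\n")).map String.toList =
              (PySem.Str.join "\n" q).toList ::
                (rest.map (PySem.Str.join "\n")).map String.toList from by simp]
        rw [PySem.Chars.join_cons_cons]
        congr 1
        rw [show ((PySem.Str.join "\n" q).toList ::
              (rest.map (PySem.Str.join "\n")).map String.toList) =
              (((q :: rest).map (PySem.Str.join "\n")).map String.toList) from by simp]
        have e2 : ("\n\n" : String).toList = ['\n', '\n'] := rfl
        have e1 : ("\n" : String).toList = ['\n'] := rfl
        rw [← e2, ← e1, ← PySem.Str.toList_join, ← PySem.Str.toList_join, ihx]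
      rw [step1, step2, PySem.Str.toList_join]
      simp [List.append_assoc]

-- ===== VERDICT (by name: the statement is the Claim_ definition above) =====
theorem format_scilla_code_spec : Claim_equal_format_scilla_code := by
  intro code _
  unfold Spec_format_scilla_code format_scilla_code format_scilla_code_alt
  set L0 := (PySem.Str.split? code "\n").getD [] with hL0
  show PySem.Str.join "\n" (pvPopTrailing (L0.foldl (fun acc line =>
      let l := PySem.Str.rstrip line
      if l ≠ "" ∨ (acc ≠ [] ∧ acc.getLastD "" ≠ "") then acc ++ [l] else acc) [])) ++ "\n" = _
  have hA : L0.foldl (fun acc line =>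
      let l := PySem.Str.rstrip line
      if l ≠ "" ∨ (acc ≠ [] ∧ acc.getLastD "" ≠ "") then acc ++ [l] else acc) [] =
      (L0.map PySem.Str.rstrip).foldl pvStepA [] := by
    rw [List.foldl_map]; rfl
  have hB : L0.foldl (fun (st : List (List String) × List String) line =>
      let l := PySem.Str.rstrip line
      if l ≠ "" then (st.1, st.2 ++ [l])
      else if st.2 ≠ [] then (st.1 ++ [st.2], ([] : List String))
      else st) ([], []) = (L0.map PySem.Str.rstrip).foldl pvStepB ([], []) := by
    rw [List.foldl_map]; rfl
  rw [hA, hB]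
  obtain ⟨h1, h2, h3⟩ := pv_loop (L0.map PySem.Str.rstrip) [] [] (by simp) (by simp)
  have h3' : (L0.map PySem.Str.rstrip).foldl pvStepA [] =
      pvShape ((L0.map PySem.Str.rstrip).foldl pvStepB ([], [])).1
        ((L0.map PySem.Str.rstrip).foldl pvStepB ([], [])).2 := by
    rw [show ([] : List String) = pvShape [] [] from rfl]; exact h3
  rw [h3', pvPop_shape _ _ h1 h2, pvJoin_eq]
  intro p hp
  by_cases hc : ((L0.map PySem.Str.rstrip).foldl pvStepB ([], [])).2 ≠ []
  · rw [if_pos hc] at hp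
    rcases List.mem_append.1 hp with hm | hm
    · exact (h1 p hm).1
    · simp at hm; subst hm; exact hc
  · rw [if_neg hc] at hp
    exact (h1 p hp).1
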